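-- pv_equiv track=rewrite | github.com/Petrofff93/DataScience_ML_Course | 01.Python_knowledge_check/speeding.py | caught_speeding
-- ===== SOURCE A (Python) =====
-- def caught_speeding(speed, is_birthday):
--     speed_cases = {
--         'No ticket': [60],
--         'Small ticket': [61, 80],
--         'Big ticket': [81]
--     }
--
--     if is_birthday:
--         for key, value in speed_cases.items():
--             speed_cases[key] = [x + 5 for x in value]
--
--     for k, v in speed_cases.items():
--         if k == 'No ticket':
--             if speed <= v[0]:
--                 return k
--
--         elif k == 'Small ticket':
--             if v[0] <= speed <= v[1]:
--                 return k
--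
--         elif k == 'Big ticket':
--             return k
-- ===== SOURCE B (Python) =====
-- def caught_speeding(speed, is_birthday):
--     limit = 65 if is_birthday else 60
--     severity = (speed > limit) + (speed > limit + 20)
--     return ('No ticket', 'Small ticket', 'Big ticket')[severity]
-- ===== Notes on version B (the rewrite author's own statement) =====
-- stated objective: alternative
-- what changed: Replaces the dictionary and branch/loop dispatch with branch-free arithmetic: the severity index is the count of thresholds exceeded (sum of two boolean comparisons) used to index a fixed tuple of labels.
import Mathlib
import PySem

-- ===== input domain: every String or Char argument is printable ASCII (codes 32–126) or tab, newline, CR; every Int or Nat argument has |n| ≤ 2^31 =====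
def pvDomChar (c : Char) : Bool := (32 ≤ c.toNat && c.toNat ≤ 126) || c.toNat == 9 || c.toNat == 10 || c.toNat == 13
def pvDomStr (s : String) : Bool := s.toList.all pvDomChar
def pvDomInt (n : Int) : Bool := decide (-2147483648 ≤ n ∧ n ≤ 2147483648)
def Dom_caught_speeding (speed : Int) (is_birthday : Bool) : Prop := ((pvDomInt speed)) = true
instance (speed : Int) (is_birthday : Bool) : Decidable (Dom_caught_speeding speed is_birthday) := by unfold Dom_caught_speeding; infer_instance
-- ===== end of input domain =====

-- B replaces the dictionary and branch/loop dispatch with branch-free arithmetic: the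
-- severity index is the count of thresholds exceeded, used to index a fixed label tuple
-- (objective: alternative decomposition, same cost).

-- ===== PORT A =====
-- the loop 'for k, v in speed_cases.items(): …' with early returns; the final 'Big ticket'
-- branch returns unconditionally, so the [] case (Python's implicit None) is unreachable.
def caughtSpeedingLoop (speed : Int) : List (String × List Int) → String
  | [] => ""   -- unreachable: the 'Big ticket' entry always returns
  | (k, v) :: rest =>
    if k = "No ticket" then
      if speed ≤ (PySem.List.pyGet? v 0).getD 0 then k else caughtSpeedingLoop speed rest
    else if k = "Small ticket" then
      if (PySem.List.pyGet? v 0).getD 0 ≤ speed ∧ speed ≤ (PySem.List.pyGet? v 1).getD 0 then k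
      else caughtSpeedingLoop speed rest
    else if k = "Big ticket" then k
    else caughtSpeedingLoop speed rest

def caught_speeding (speed : Int) (is_birthday : Bool) : String :=
  let speed_cases : PySem.Dict String (List Int) :=
    ((PySem.Dict.empty.insert "No ticket" [60]).insert "Small ticket" [61, 80]).insert "Big ticket" [81]
  let speed_cases :=
    if is_birthday then
      speed_cases.items.foldl (fun d kv => d.insert kv.1 (kv.2.map (· + 5))) speed_cases
    else speed_cases
  caughtSpeedingLoop speed speed_cases.items

-- ===== PORT B =====
-- '(speed > limit) + (speed > limit + 20)' — Python bools add as 0/1; tuple indexing is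
-- total here since the index is 0, 1 or 2 (pyGet? never returns none; getD "" is unreachable).
def caught_speeding_alt (speed : Int) (is_birthday : Bool) : String :=
  let limit : Int := if is_birthday then 65 else 60
  let severity : Int := (if speed > limit then 1 else 0) + (if speed > limit + 20 then 1 else 0)
  (PySem.List.pyGet? ["No ticket", "Small ticket", "Big ticket"] severity).getD ""

-- ===== PRECONDITION & SPEC =====
def Spec_caught_speeding (speed : Int) (is_birthday : Bool) (out : String) : Prop := out = caught_speeding_alt speed is_birthday
instance (speed : Int) (is_birthday : Bool) (out : String) : Decidable (Spec_caught_speeding speed is_birthday out) := by unfold Spec_caught_speeding; infer_instance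

-- ===== CLAIM (what is proved, stated in full; the proofs are below) =====
def Claim_equal_caught_speeding : Prop := ∀ (speed : Int) (is_birthday : Bool), Dom_caught_speeding speed is_birthday → Spec_caught_speeding speed is_birthday (caught_speeding speed is_birthday)

-- ===== LEMMAS AND PROOFS =====

-- ===== VERDICT (by name: the statement is the Claim_ definition above) =====
theorem caught_speeding_spec : Claim_equal_caught_speeding := by
  intro speed is_birthday _
  unfold Spec_caught_speeding caught_speeding caught_speeding_alt
  cases is_birthday <;>
    simp [caughtSpeedingLoop, PySem.Dict.insert, PySem.Dict.empty, PySem.List.pyGet?,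
          PySem.List.pyIdx?] <;>
    split_ifs <;> first | rfl | omega
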